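-- pv_equiv track=rewrite | github.com/willcoderwang/leetcode | 954.py | canReorderDoubledGreat0
-- ===== SOURCE A (Python) =====
-- def canReorderDoubledGreat0(arr):
--     if not arr:
--         return True
--
--     flag = [True] * len(arr)
--     arr.sort()
--     p2 = 0
--     for p1 in range(len(arr)):
--         if not flag[p1]:
--             continue
--
--         p2 += 1
--         if p2 <= p1:
--             p2 = p1 + 1
--         while p2 <= len(arr) - 1 and arr[p2] < arr[p1] * 2:
--             p2 += 1
--
--         if p2 >= len(arr) or arr[p2] != arr[p1] * 2:
--             return False
--
--         flag[p2] = False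
--     else:
--         return True
-- ===== SOURCE B (Python) =====
-- def canReorderDoubledGreat0(arr):
--     arr.sort()
--     need = {}
--     for v in arr:
--         if need.get(v, 0) > 0:
--             need[v] -= 1
--         else:
--             need[2 * v] = need.get(2 * v, 0) + 1
--     return all(c == 0 for c in need.values())
-- ===== Notes on version B (the rewrite author's own statement) =====
-- stated objective: simpler
-- what changed: A pairs elements of the sorted array with a flag array and a monotone second pointer that scans ahead for each element's double; B makes a single pass over the sorted array keeping a dictionary of pending doubles (each value either clears a pending need or records a need for its double) and checks the dictionary is empty at the end.
import Mathlib
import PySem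

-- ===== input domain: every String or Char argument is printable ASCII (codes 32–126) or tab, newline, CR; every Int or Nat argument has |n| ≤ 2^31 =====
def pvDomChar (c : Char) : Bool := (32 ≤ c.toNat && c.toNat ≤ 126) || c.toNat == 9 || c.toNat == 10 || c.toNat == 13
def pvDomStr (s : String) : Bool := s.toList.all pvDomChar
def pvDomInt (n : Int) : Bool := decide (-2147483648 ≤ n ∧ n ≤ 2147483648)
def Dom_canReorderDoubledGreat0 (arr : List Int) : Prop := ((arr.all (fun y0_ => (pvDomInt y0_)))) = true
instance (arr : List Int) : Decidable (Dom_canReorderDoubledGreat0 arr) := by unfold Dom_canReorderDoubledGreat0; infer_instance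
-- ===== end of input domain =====

-- B replaces A's flag array + monotone second pointer with a single pass over the sorted list
-- keeping a dictionary of pending doubles (objective: simpler).  Both A and B sort the caller's
-- list in place (arr.sort()); the equivalence proved here is about the return value.

-- ===== PORT A =====

def pvAdvance (l : List Int) (t : Int) (p2 : Nat) : Nat :=
  if h : p2 < l.length ∧ l.getD p2 0 < t then pvAdvance l t (p2 + 1) else p2
termination_by l.length - p2
decreasing_by omega


def pvLoopA (l : List Int) (flag : List Bool) (p2 p1 : Nat) : Bool :=
  if _h : p1 < l.length then
    if flag.getD p1 true = false then pvLoopA l flag p2 (p1 + 1)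
    else
      let x := l.getD p1 0
      let q := pvAdvance l (2 * x) (max (p2 + 1) (p1 + 1))
      if q ≥ l.length ∨ l.getD q 0 ≠ 2 * x then false
      else pvLoopA l (flag.set q false) q (p1 + 1)
  else true
termination_by l.length - p1
decreasing_by all_goals omega


def canReorderDoubledGreat0 (arr : List Int) : Bool :=
  if arr = [] then true
  else pvLoopA (PySem.List.sorted arr (fun x => x) false)
               (List.replicate arr.length true) 0 0

-- ===== PORT B =====

def pvLoopB (need : PySem.Dict Int Int) : List Int → PySem.Dict Int Int
  | [] => need
  | v :: rest =>
    if need.getD v 0 > 0 then pvLoopB (need.insert v (need.getD v 0 - 1)) rest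
    else pvLoopB (need.insert (2 * v) (need.getD (2 * v) 0 + 1)) rest


def canReorderDoubledGreat0_alt (arr : List Int) : Bool :=
  (pvLoopB PySem.Dict.empty (PySem.List.sorted arr (fun x => x) false)).values.all
    (fun c => c == 0)

-- ===== PRECONDITION & SPEC =====
def Spec_canReorderDoubledGreat0 (arr : List Int) (out : Bool) : Prop := out = canReorderDoubledGreat0_alt arr
instance (arr : List Int) (out : Bool) : Decidable (Spec_canReorderDoubledGreat0 arr out) := by unfold Spec_canReorderDoubledGreat0; infer_instance

-- ===== CLAIM (what is proved, stated in full; the proofs are below) =====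
def Claim_equal_canReorderDoubledGreat0 : Prop := ∀ (arr : List Int), Dom_canReorderDoubledGreat0 arr → Spec_canReorderDoubledGreat0 arr (canReorderDoubledGreat0 arr)

-- ===== LEMMAS AND PROOFS =====

lemma pvGetD_replicate (k j : Nat) : (List.replicate k true).getD j true = true := by
  rw [List.getD_eq_getElem?_getD, List.getElem?_replicate]
  split <;> rfl

def pvCnt (l : List Int) (flag : List Bool) (p : Nat) (v : Int) : Nat :=
  ((Finset.range l.length).filter
    (fun j => p ≤ j ∧ flag.getD j true = false ∧ l.getD j 0 = v)).card

lemma pvCnt_succ_of_true {l : List Int} {flag : List Bool} {p : Nat} (v : Int)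
    (hf : flag.getD p true = true) :
    pvCnt l flag (p + 1) v = pvCnt l flag p v := by
  unfold pvCnt
  congr 1
  ext j
  simp only [Finset.mem_filter, Finset.mem_range]
  constructor
  · rintro ⟨h1, h2, h3, h4⟩; exact ⟨h1, by omega, h3, h4⟩
  · rintro ⟨h1, h2, h3, h4⟩
    refine ⟨h1, ?_, h3, h4⟩
    by_cases h : j = p
    · subst h; rw [hf] at h3; cases h3
    · omega

lemma pvCnt_succ_of_false {l : List Int} {flag : List Bool} {p : Nat} (v : Int)
    (hp : p < l.length) (hf : flag.getD p true = false) :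
    pvCnt l flag p v = pvCnt l flag (p + 1) v + (if l.getD p 0 = v then 1 else 0) := by
  unfold pvCnt
  by_cases hv : l.getD p 0 = v
  · rw [if_pos hv]
    have : ((Finset.range l.length).filter
        (fun j => p ≤ j ∧ flag.getD j true = false ∧ l.getD j 0 = v)) =
        insert p ((Finset.range l.length).filter
        (fun j => p + 1 ≤ j ∧ flag.getD j true = false ∧ l.getD j 0 = v)) := by
      ext j
      simp only [Finset.mem_insert, Finset.mem_filter, Finset.mem_range]
      constructor
      · rintro ⟨h1, h2, h3, h4⟩
        rcases Nat.eq_or_lt_of_le h2 with h | h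
        · exact Or.inl h.symm
        · exact Or.inr ⟨h1, by omega, h3, h4⟩
      · rintro (rfl | ⟨h1, h2, h3, h4⟩)
        · exact ⟨hp, le_refl _, hf, hv⟩
        · exact ⟨h1, by omega, h3, h4⟩
    rw [this, Finset.card_insert_of_notMem]
    simp only [Finset.mem_filter]
    rintro ⟨-, h2, -⟩; omega
  · rw [if_neg hv]
    simp only [Nat.add_zero]
    congr 1
    ext j
    simp only [Finset.mem_filter, Finset.mem_range]
    constructor
    · rintro ⟨h1, h2, h3, h4⟩
      refine ⟨h1, ?_, h3, h4⟩
      rcases Nat.eq_or_lt_of_le h2 with h | h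
      · subst h; exact absurd h4 hv
      · omega
    · rintro ⟨h1, h2, h3, h4⟩; exact ⟨h1, by omega, h3, h4⟩

lemma pvGetD_set_bool (flag : List Bool) (q j : Nat) (b : Bool) :
    (flag.set q b).getD j true = if j = q ∧ q < flag.length then b else flag.getD j true := by
  by_cases hq : q < flag.length
  · by_cases hj : j = q
    · subst hj
      rw [if_pos ⟨rfl, hq⟩, List.getD_eq_getElem?_getD, List.getElem?_set_self (by simpa using hq)]
      rfl
    · rw [if_neg (by tauto), List.getD_eq_getElem?_getD, List.getElem?_set_ne (by omega),
        ← List.getD_eq_getElem?_getD]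
  · rw [List.set_eq_of_length_le (by omega), if_neg (by tauto)]

lemma pvCnt_set_false {l : List Int} {flag : List Bool} {p q : Nat} (v : Int)
    (hlen : flag.length = l.length)
    (hq : q < l.length) (hfq : flag.getD q true = true) (hpq : p ≤ q) :
    pvCnt l (flag.set q false) p v = pvCnt l flag p v + (if l.getD q 0 = v then 1 else 0) := by
  unfold pvCnt
  have hset : ∀ j, (flag.set q false).getD j true =
      if j = q then false else flag.getD j true := by
    intro j
    rw [pvGetD_set_bool]
    by_cases hj : j = q
    · simp [hj, hlen, hq]
    · simp [hj]
  by_cases hv : l.getD q 0 = v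
  · rw [if_pos hv]
    have : ((Finset.range l.length).filter
        (fun j => p ≤ j ∧ (flag.set q false).getD j true = false ∧ l.getD j 0 = v)) =
        insert q ((Finset.range l.length).filter
        (fun j => p ≤ j ∧ flag.getD j true = false ∧ l.getD j 0 = v)) := by
      ext j
      simp only [Finset.mem_insert, Finset.mem_filter, Finset.mem_range, hset]
      by_cases hj : j = q
      · subst hj
        have hv' := hv; have hfq' := hfq
        rw [List.getD_eq_getElem?_getD] at hv' hfq'
        have hv2 : l[j] = v := by rw [← List.getD_eq_getElem l 0 hq]; exact hv
        simp [hq, hpq, hv2, hfq']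
      · simp only [if_neg hj]
        constructor
        · rintro ⟨h1, h2, h3, h4⟩; exact Or.inr ⟨h1, h2, h3, h4⟩
        · rintro (h | ⟨h1, h2, h3, h4⟩)
          · exact absurd h hj
          · exact ⟨h1, h2, h3, h4⟩
    rw [this, Finset.card_insert_of_notMem]
    simp only [Finset.mem_filter]
    rintro ⟨-, -, h3, -⟩; rw [hfq] at h3; cases h3
  · rw [if_neg hv]
    simp only [Nat.add_zero]
    congr 1
    ext j
    simp only [Finset.mem_filter, Finset.mem_range, hset]
    by_cases hj : j = q
    · subst hj
      have hv' := hv; have hfq' := hfq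
      rw [List.getD_eq_getElem?_getD] at hv' hfq'
      simp [hv', hfq']
    · simp [hj]

lemma pvSorted_mono {l : List Int} (hs : l.Pairwise (· ≤ ·)) {i j : Nat}
    (hij : i ≤ j) (hj : j < l.length) : l.getD i 0 ≤ l.getD j 0 := by
  have hi : i < l.length := lt_of_le_of_lt hij hj
  rw [List.getD_eq_getElem _ _ hi, List.getD_eq_getElem _ _ hj]
  rcases Nat.eq_or_lt_of_le hij with h | h
  · subst h; rfl
  · exact List.pairwise_iff_getElem.mp hs i j hi hj h

lemma pvAdvance_ge (l : List Int) (t : Int) : ∀ p2, p2 ≤ pvAdvance l t p2 := by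
  intro p2
  induction p2 using pvAdvance.induct (l := l) (t := t) with
  | case1 p2 h ih => rw [pvAdvance, dif_pos h]; omega
  | case2 p2 h => rw [pvAdvance, dif_neg h]

lemma pvAdvance_skipped (l : List Int) (t : Int) : ∀ p2 j, p2 ≤ j → j < pvAdvance l t p2 →
    l.getD j 0 < t := by
  intro p2
  induction p2 using pvAdvance.induct (l := l) (t := t) with
  | case1 p2 h ih =>
    intro j hj1 hj2
    rw [pvAdvance, dif_pos h] at hj2
    by_cases hjp : j = p2
    · subst hjp; exact h.2
    · exact ih j (by omega) hj2
  | case2 p2 h =>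
    intro j hj1 hj2
    rw [pvAdvance, dif_neg h] at hj2
    omega

lemma pvAdvance_stop (l : List Int) (t : Int) : ∀ p2,
    pvAdvance l t p2 < l.length → t ≤ l.getD (pvAdvance l t p2) 0 := by
  intro p2
  induction p2 using pvAdvance.induct (l := l) (t := t) with
  | case1 p2 h ih =>
    rw [pvAdvance, dif_pos h]; exact ih
  | case2 p2 h =>
    rw [pvAdvance, dif_neg h]
    intro hlt
    push_neg at h
    exact h hlt

lemma pvDict_getD_zero_of_all_zero {d : PySem.Dict Int Int}
    (h : d.values.all (fun c => c == 0) = true) (v : Int) :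
    d.getD v 0 = 0 := by
  rcases hg : d.get? v with _ | w
  · exact PySem.Dict.getD_of_get?_eq_none d 0 hg
  · have hmem := PySem.Dict.mem_items_of_get?_eq_some d hg
    have hw : w ∈ d.values := by
      have : d.values = d.items.map (·.2) := rfl
      rw [this]
      exact List.mem_map.mpr ⟨(v, w), hmem, rfl⟩
    have := List.all_eq_true.mp h w hw
    have hw0 : w = 0 := by simpa using this
    rw [PySem.Dict.getD_of_get?_eq_some d 0 hg, hw0]

lemma pvLoopB_bound : ∀ (rest : List Int) (need : PySem.Dict Int Int),
    (pvLoopB need rest).values.all (fun c => c == 0) = true →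
    ∀ v, need.getD v 0 ≤ (rest.count v : Int) := by
  intro rest
  induction rest with
  | nil =>
    intro need h v
    rw [pvLoopB] at h
    simp [pvDict_getD_zero_of_all_zero h v]
  | cons a rest ih =>
    intro need h v
    rw [pvLoopB] at h
    have hcount : ((a :: rest).count v : Int) =
        (rest.count v : Int) + (if v = a then 1 else 0) := by
      rw [List.count_cons]
      by_cases hva : v = a
      · simp [hva]
      · simp [hva, Ne.symm hva]
    rw [hcount]
    by_cases hpos : need.getD a 0 > 0
    · rw [if_pos hpos] at h
      have hb := ih _ h
      by_cases hv : v = a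
      · subst hv
        have hx := hb v
        rw [PySem.Dict.getD_insert] at hx
        rw [if_pos rfl] at hx
        rw [if_pos rfl]
        omega
      · have hx := hb v
        rw [PySem.Dict.getD_insert, if_neg hv] at hx
        rw [if_neg hv]
        omega
    · rw [if_neg hpos] at h
      have hb := ih _ h
      have hnn : (0:Int) ≤ (rest.count v : Int) := Int.natCast_nonneg _
      by_cases hva : v = a
      · subst hva
        have : need.getD v 0 ≤ 0 := by omega
        split_ifs <;> omega
      · rw [if_neg hva]
        by_cases hv2 : v = 2 * a
        · subst hv2
          have hx := hb (2 * a)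
          rw [PySem.Dict.getD_insert, if_pos rfl] at hx
          omega
        · have hx := hb v
          rw [PySem.Dict.getD_insert, if_neg hv2] at hx
          omega

lemma pvFilterCard_succ (l : List Int) (v : Int) (p : Nat) (hp : p < l.length) :
    ((Finset.range l.length).filter (fun j => p ≤ j ∧ l.getD j 0 = v)).card
    = ((Finset.range l.length).filter (fun j => p + 1 ≤ j ∧ l.getD j 0 = v)).card
      + (if l.getD p 0 = v then 1 else 0) := by
  by_cases hv : l.getD p 0 = v
  · rw [if_pos hv]
    have : ((Finset.range l.length).filter (fun j => p ≤ j ∧ l.getD j 0 = v)) =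
        insert p ((Finset.range l.length).filter (fun j => p + 1 ≤ j ∧ l.getD j 0 = v)) := by
      ext j
      simp only [Finset.mem_insert, Finset.mem_filter, Finset.mem_range]
      constructor
      · rintro ⟨h1, h2, h3⟩
        by_cases hj : j = p
        · exact Or.inl hj
        · exact Or.inr ⟨h1, by omega, h3⟩
      · rintro (rfl | ⟨h1, h2, h3⟩)
        · exact ⟨hp, le_refl _, hv⟩
        · exact ⟨h1, by omega, h3⟩
    rw [this, Finset.card_insert_of_notMem]
    simp only [Finset.mem_filter]
    rintro ⟨-, h2, -⟩; omega
  · rw [if_neg hv, Nat.add_zero]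
    congr 1
    ext j
    simp only [Finset.mem_filter, Finset.mem_range]
    constructor
    · rintro ⟨h1, h2, h3⟩
      refine ⟨h1, ?_, h3⟩
      by_cases hj : j = p
      · subst hj; exact absurd h3 hv
      · omega
    · rintro ⟨h1, h2, h3⟩; exact ⟨h1, by omega, h3⟩

lemma pvCount_drop (l : List Int) (v : Int) : ∀ p,
    (l.drop p).count v =
      ((Finset.range l.length).filter (fun j => p ≤ j ∧ l.getD j 0 = v)).card := by
  have H : ∀ k p, l.length - p ≤ k → (l.drop p).count v =
      ((Finset.range l.length).filter (fun j => p ≤ j ∧ l.getD j 0 = v)).card := by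
    intro k
    induction k with
    | zero =>
      intro p hp
      rw [List.drop_eq_nil_of_le (by omega), List.count_nil]
      symm
      rw [Finset.card_eq_zero]
      ext j
      simp only [Finset.mem_filter, Finset.mem_range, Finset.notMem_empty, iff_false]
      rintro ⟨h1, h2, -⟩; omega
    | succ k ih =>
      intro p hp
      by_cases hlt : p < l.length
      · rw [List.drop_eq_getElem_cons hlt, List.count_cons, pvFilterCard_succ l v p hlt,
          ← ih (p + 1) (by omega)]
        have hg : l[p] = l.getD p 0 := (List.getD_eq_getElem l 0 hlt).symm
        by_cases hv : l.getD p 0 = v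
        · simp [hg, hv]
        · simp [hg, hv, fun h : v = l.getD p 0 => hv h.symm]
      · rw [List.drop_eq_nil_of_le (by omega), List.count_nil]
        symm
        rw [Finset.card_eq_zero]
        ext j
        simp only [Finset.mem_filter, Finset.mem_range, Finset.notMem_empty, iff_false]
        rintro ⟨h1, h2, -⟩; omega
  exact fun p => H (l.length - p) p (le_refl _)

lemma pvBside_zero (need : PySem.Dict Int Int) (hnd : need.keys.Nodup)
    (h0 : ∀ v, need.getD v 0 = 0) :
    need.values.all (fun c => c == 0) = true := by
  rw [PySem.Dict.values_eq_map_keys need hnd 0]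
  apply List.all_eq_true.mpr
  intro c hc
  rcases List.mem_map.mp hc with ⟨k, -, rfl⟩
  simp [h0 k]

lemma pvCnt_zero_of_ge (l : List Int) (flag : List Bool) (p : Nat) (v : Int)
    (hp : l.length ≤ p) : pvCnt l flag p v = 0 := by
  unfold pvCnt
  rw [Finset.card_eq_zero]
  ext j
  simp only [Finset.mem_filter, Finset.mem_range, Finset.notMem_empty, iff_false]
  rintro ⟨h1, h2, -⟩; omega

lemma pvLoopA_eq (l : List Int) (flag : List Bool) (p2 p1 : Nat) :
    pvLoopA l flag p2 p1 =
    if p1 < l.length then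
      if flag.getD p1 true = false then pvLoopA l flag p2 (p1 + 1)
      else
        if pvAdvance l (2 * l.getD p1 0) (max (p2 + 1) (p1 + 1)) ≥ l.length ∨
           l.getD (pvAdvance l (2 * l.getD p1 0) (max (p2 + 1) (p1 + 1))) 0 ≠ 2 * l.getD p1 0
        then false
        else pvLoopA l (flag.set (pvAdvance l (2 * l.getD p1 0) (max (p2 + 1) (p1 + 1))) false)
               (pvAdvance l (2 * l.getD p1 0) (max (p2 + 1) (p1 + 1))) (p1 + 1)
    else true := by
  rw [pvLoopA]
  rfl


lemma pvMain (l : List Int) (hs : l.Pairwise (· ≤ ·)) (hnn : ∀ x ∈ l, (0:Int) ≤ x) :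
    ∀ (fuel : Nat) (p1 : Nat) (flag : List Bool) (p2 : Nat) (need : PySem.Dict Int Int),
    l.length - p1 ≤ fuel →
    flag.length = l.length →
    need.keys.Nodup →
    (∀ v, need.getD v 0 = (pvCnt l flag p1 v : Int)) →
    (∀ j, flag.getD j true = false → j ≤ p2) →
    (∀ j, p1 < j → j ≤ p2 → j < l.length → flag.getD j true = true →
        l.getD j 0 < 2 * l.getD p1 0) →
    (∀ j, j < l.length → flag.getD j true = false →
        ∀ i, p1 ≤ i → i < j → flag.getD i true = true → l.getD i 0 < l.getD j 0) →
    pvLoopA l flag p2 p1 = (pvLoopB need (l.drop p1)).values.all (fun c => c == 0) := by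
  intro fuel
  induction fuel with
  | zero =>
    intro p1 flag p2 need hfuel hlen hnd hinv1 hinv2 hinv3 hinv4
    have hp1 : l.length ≤ p1 := by omega
    rw [pvLoopA_eq, if_neg (by omega), List.drop_eq_nil_of_le hp1]
    rw [pvLoopB]
    symm
    exact pvBside_zero need hnd (fun v => by rw [hinv1 v, pvCnt_zero_of_ge l flag p1 v hp1]; rfl)
  | succ fuel ih =>
    intro p1 flag p2 need hfuel hlen hnd hinv1 hinv2 hinv3 hinv4
    by_cases hp1 : p1 < l.length
    · have hgx : l[p1] = l.getD p1 0 := (List.getD_eq_getElem l 0 hp1).symm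
      rw [pvLoopA_eq, if_pos hp1, List.drop_eq_getElem_cons hp1, pvLoopB, hgx]
      by_cases hflag : flag.getD p1 true = false
      · -- A skips a reserved double; B clears the pending need
        rw [if_pos hflag]
        have hmem : p1 ∈ (Finset.range l.length).filter
            (fun j => p1 ≤ j ∧ flag.getD j true = false ∧ l.getD j 0 = l.getD p1 0) := by
          simp only [Finset.mem_filter, Finset.mem_range]
          exact ⟨hp1, le_refl _, hflag, trivial⟩
        have hcntpos : 0 < pvCnt l flag p1 (l.getD p1 0) :=
          Finset.card_pos.mpr ⟨p1, hmem⟩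
        have hBpos : need.getD (l.getD p1 0) 0 > 0 := by
          rw [hinv1]
          exact_mod_cast hcntpos
        rw [if_pos hBpos]
        apply ih (p1 + 1) flag p2 _ (by omega) hlen
          (PySem.Dict.nodup_keys_insert _ _ _ hnd)
        · -- inv1
          intro v
          rw [PySem.Dict.getD_insert]
          have hstep := pvCnt_succ_of_false (l := l) (flag := flag) (p := p1) v hp1 hflag
          by_cases hv : v = l.getD p1 0
          · subst hv
            rw [if_pos rfl, hinv1, hstep, if_pos rfl]
            push_cast
            ring
          · rw [if_neg hv, hinv1, hstep, if_neg (fun h => hv h.symm)]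
            push_cast
            ring
        · exact hinv2
        · -- inv3
          intro j hj1 hj2 hj3 hj4
          have hp11 : p1 + 1 < l.length := by omega
          have hmono := pvSorted_mono hs (show p1 ≤ p1 + 1 by omega) hp11
          have := hinv3 j (by omega) hj2 hj3 hj4
          omega
        · -- inv4
          intro j hj hfj i hi1 hi2 hi3
          exact hinv4 j hj hfj i (by omega) hi2 hi3
      · -- A starts a new pair at p1; B records a pending need for its double
        rw [if_neg hflag]
        have hft : flag.getD p1 true = true := by
          revert hflag; cases flag.getD p1 true <;> simp
        have hcnt0 : pvCnt l flag p1 (l.getD p1 0) = 0 := by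
          unfold pvCnt
          rw [Finset.card_eq_zero]
          ext j
          simp only [Finset.mem_filter, Finset.mem_range, Finset.notMem_empty, iff_false]
          rintro ⟨h1, h2, h3, h4⟩
          by_cases hj : j = p1
          · subst hj; rw [hft] at h3; cases h3
          · have := hinv4 j h1 h3 p1 (le_refl _) (by omega) hft
            omega
        have hB0 : ¬ need.getD (l.getD p1 0) 0 > 0 := by
          rw [hinv1, hcnt0]
          simp
        rw [if_neg hB0]
        set q := pvAdvance l (2 * l.getD p1 0) (max (p2 + 1) (p1 + 1)) with hq
        have hqge : max (p2 + 1) (p1 + 1) ≤ q := pvAdvance_ge l _ _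
        have hfq_of_lt : ∀ j, max (p2 + 1) (p1 + 1) ≤ j → j < q → l.getD j 0 < 2 * l.getD p1 0 :=
          fun j h1 h2 => pvAdvance_skipped l _ _ j h1 h2
        by_cases hfail : q ≥ l.length ∨ l.getD q 0 ≠ 2 * l.getD p1 0
        · rw [if_pos hfail]
          -- every remaining copy of 2*x is already reserved: the new need can never be cleared
          have hkey : ∀ j, p1 < j → j < l.length → l.getD j 0 = 2 * l.getD p1 0 →
              flag.getD j true = false := by
            intro j hj1 hj2 hj3
            by_contra hc
            have hct : flag.getD j true = true := by
              revert hc; cases flag.getD j true <;> simp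
            by_cases hjp2 : j ≤ p2
            · have := hinv3 j hj1 hjp2 hj2 hct
              omega
            · have hjs : max (p2 + 1) (p1 + 1) ≤ j := by omega
              by_cases hjq : j < q
              · have := hfq_of_lt j hjs hjq
                omega
              · have hqlen : q < l.length := by omega
                have h1 := pvAdvance_stop l (2 * l.getD p1 0) (max (p2 + 1) (p1 + 1)) hqlen
                have h2 := pvSorted_mono hs (show q ≤ j by omega) hj2
                rw [← hq] at h1
                rcases hfail with h | h
                · omega
                · omega
          have hcc : (l.drop (p1 + 1)).count (2 * l.getD p1 0) =
              pvCnt l flag p1 (2 * l.getD p1 0) := by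
            rw [pvCount_drop]
            unfold pvCnt
            congr 1
            ext j
            simp only [Finset.mem_filter, Finset.mem_range]
            constructor
            · rintro ⟨h1, h2, h3⟩
              exact ⟨h1, by omega, hkey j (by omega) h1 h3, h3⟩
            · rintro ⟨h1, h2, h3, h4⟩
              refine ⟨h1, ?_, h4⟩
              by_cases hj : j = p1
              · subst hj; rw [hft] at h3; cases h3
              · omega
          symm
          by_contra hB
          have hBtrue : (pvLoopB (need.insert (2 * l.getD p1 0)
              (need.getD (2 * l.getD p1 0) 0 + 1))
              (l.drop (p1 + 1))).values.all (fun c => c == 0) = true := by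
            revert hB; cases hfin : (pvLoopB _ _).values.all (fun c => c == 0) <;> simp
          have hbound := pvLoopB_bound (l.drop (p1 + 1)) _ hBtrue (2 * l.getD p1 0)
          rw [PySem.Dict.getD_insert, if_pos rfl, hcc, hinv1] at hbound
          omega
        · rw [if_neg hfail]
          push_neg at hfail
          obtain ⟨hqlen', hqval⟩ := hfail
          have hqlen : q < l.length := by omega
          have hfqt : flag.getD q true = true := by
            by_contra hc
            have hcf : flag.getD q true = false := by
              revert hc; cases flag.getD q true <;> simp
            have := hinv2 q hcf
            omega
          apply ih (p1 + 1) (flag.set q false) q _ (by omega)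
            (by rw [List.length_set]; exact hlen)
            (PySem.Dict.nodup_keys_insert _ _ _ hnd)
          · -- inv1
            intro v
            have hset : ∀ j, (flag.set q false).getD j true =
                if j = q then false else flag.getD j true := by
              intro j
              rw [pvGetD_set_bool]
              by_cases hj : j = q
              · simp [hj, hlen, hqlen]
              · simp [hj]
            have h1 : pvCnt l (flag.set q false) (p1 + 1) v
                = pvCnt l (flag.set q false) p1 v := by
              apply pvCnt_succ_of_true
              rw [hset, if_neg (by omega)]
              exact hft
            have h2 := pvCnt_set_false (l := l) (flag := flag) (p := p1) (q := q) v
              hlen hqlen hfqt (by omega)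
            rw [PySem.Dict.getD_insert, h1, h2]
            by_cases hv : v = 2 * l.getD p1 0
            · subst hv
              rw [if_pos rfl, hinv1, if_pos hqval]
              push_cast
              ring
            · rw [if_neg hv, hinv1, if_neg (by rw [hqval]; omega)]
              push_cast
              ring
          · -- inv2
            intro j hj
            rw [pvGetD_set_bool] at hj
            by_cases hjq : j = q
            · omega
            · rw [if_neg (by tauto)] at hj
              have := hinv2 j hj
              omega
          · -- inv3
            intro j hj1 hj2 hj3 hj4
            rw [pvGetD_set_bool] at hj4
            have hjq : j ≠ q := by
              intro h
              rw [if_pos ⟨h, by omega⟩] at hj4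
              cases hj4
            rw [if_neg (by tauto)] at hj4
            have hp11 : p1 + 1 < l.length := by omega
            have hmono := pvSorted_mono hs (show p1 ≤ p1 + 1 by omega) hp11
            by_cases hjp2 : j ≤ p2
            · have := hinv3 j (by omega) hjp2 hj3 hj4
              omega
            · have := hfq_of_lt j (by omega) (by omega)
              omega
          · -- inv4
            intro j hj hfj i hi1 hi2 hi3
            rw [pvGetD_set_bool] at hfj hi3
            have hiq : i ≠ q := by
              intro h
              rw [if_pos ⟨h, by omega⟩] at hi3
              cases hi3
            rw [if_neg (by tauto)] at hi3
            by_cases hjq : j = q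
            · subst hjq
              rw [hqval]
              by_cases hip2 : i ≤ p2
              · exact hinv3 i (by omega) hip2 (by omega) hi3
              · exact hfq_of_lt i (by omega) hi2
            · rw [if_neg (by tauto)] at hfj
              exact hinv4 j hj hfj i (by omega) hi2 hi3
    · rw [pvLoopA_eq, if_neg hp1, List.drop_eq_nil_of_le (by omega)]
      rw [pvLoopB]
      symm
      exact pvBside_zero need hnd
        (fun v => by rw [hinv1 v, pvCnt_zero_of_ge l flag p1 v (by omega)]; rfl)

lemma pvNegCase (l : List Int) (hs : l.Pairwise (· ≤ ·)) (k : Nat)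
    (hne : l ≠ []) (hneg : l.getD 0 0 < 0) :
    pvLoopA l (List.replicate k true) 0 0 = false ∧
    (pvLoopB PySem.Dict.empty l).values.all (fun c => c == 0) = false := by
  cases l with
  | nil => exact absurd rfl hne
  | cons x t =>
    have hx : (x :: t).getD 0 0 = x := rfl
    rw [hx] at hneg
    have hxle : ∀ y ∈ t, x ≤ y := (List.pairwise_cons.mp hs).1
    constructor
    · -- A fails immediately: the minimum's double is smaller than everything
      rw [pvLoopA_eq, if_pos (by simp), if_neg (by rw [pvGetD_replicate]; simp)]
      simp only [show max (0 + 1) (0 + 1) = 1 from rfl]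
      have hq1 : pvAdvance (x :: t) (2 * (x :: t).getD 0 0) 1 = 1 := by
        rw [pvAdvance, dif_neg]
        rintro ⟨h1, h2⟩
        rw [hx] at h2
        cases t with
        | nil => simp at h1
        | cons y t' =>
          have : x ≤ y := hxle y (by simp)
          have hy : (x :: y :: t').getD 1 0 = y := rfl
          rw [hy] at h2
          omega
      rw [hq1]
      rw [if_pos]
      cases t with
      | nil => exact Or.inl (by simp)
      | cons y t' =>
        refine Or.inr ?_
        have hy : (x :: y :: t').getD 1 0 = y := rfl
        have : x ≤ y := hxle y (by simp)
        rw [hy, hx]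
        omega
    · -- B records need 2*x, which nothing ≥ x can ever clear
      rw [pvLoopB, if_neg (by rw [PySem.Dict.getD_empty]; omega)]
      by_contra hB
      have hBtrue : (pvLoopB (PySem.Dict.empty.insert (2 * x)
          (PySem.Dict.getD PySem.Dict.empty (2 * x) 0 + 1)) t).values.all
          (fun c => c == 0) = true := by
        revert hB; cases hfin : (pvLoopB _ _).values.all (fun c => c == 0) <;> simp
      have hbound := pvLoopB_bound t _ hBtrue (2 * x)
      rw [PySem.Dict.getD_insert, if_pos rfl, PySem.Dict.getD_empty] at hbound
      have hcnt0 : t.count (2 * x) = 0 := by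
        rw [List.count_eq_zero]
        intro hmem
        have := hxle (2 * x) hmem
        omega
      rw [hcnt0] at hbound
      omega

-- ===== VERDICT (by name: the statement is the Claim_ definition above) =====
theorem canReorderDoubledGreat0_spec : Claim_equal_canReorderDoubledGreat0 := by
  intro arr _hdom
  unfold Spec_canReorderDoubledGreat0
  by_cases harr : arr = []
  · subst harr; rfl
  · unfold canReorderDoubledGreat0 canReorderDoubledGreat0_alt
    rw [if_neg harr]
    have hs : (PySem.List.sorted arr (fun x => x) false).Pairwise (· ≤ ·) := by
      simpa using PySem.List.sorted_pairwise arr (fun x => x)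
    set l := PySem.List.sorted arr (fun x => x) false with hl
    have hlen : l.length = arr.length := PySem.List.length_sorted arr _ _
    have hne : l ≠ [] := fun h => harr ((PySem.List.sorted_eq_nil_iff arr _ _).mp h)
    by_cases hneg : l.getD 0 0 < 0
    · obtain ⟨hA, hB⟩ := pvNegCase l hs arr.length hne hneg
      rw [hA, hB]
    · have hnn : ∀ y ∈ l, (0:Int) ≤ y := by
        intro y hy
        cases hl2 : l with
        | nil => rw [hl2] at hy; cases hy
        | cons a t =>
          rw [hl2] at hy hneg hs
          have ha : (0:Int) ≤ a := by
            have : (a :: t).getD 0 0 = a := rfl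
            omega
          rcases List.mem_cons.mp hy with rfl | hyt
          · exact ha
          · have := (List.pairwise_cons.mp hs).1 y hyt
            omega
      have hcnt : ∀ v, pvCnt l (List.replicate arr.length true) 0 v = 0 := by
        intro v
        unfold pvCnt
        rw [Finset.card_eq_zero]
        ext j
        simp only [Finset.mem_filter, Finset.mem_range, Finset.notMem_empty, iff_false]
        rintro ⟨-, -, h3, -⟩
        rw [pvGetD_replicate] at h3
        cases h3
      have hmain := pvMain l hs hnn l.length 0 (List.replicate arr.length true) 0
        PySem.Dict.empty (by omega) (by rw [List.length_replicate, hlen])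
        (by simp)
        (fun v => by rw [PySem.Dict.getD_empty, hcnt v]; rfl)
        (fun j hj => by rw [pvGetD_replicate] at hj; cases hj)
        (fun j hj1 hj2 _ _ => by omega)
        (fun j _ hfj => by rw [pvGetD_replicate] at hfj; cases hfj)
      rw [List.drop_zero] at hmain
      exact hmain
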